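-- pv_equiv track=rewrite | github.com/Tranphong1011/Govhackapp | app.py | _detect_data_domain
-- ===== SOURCE A (Python) =====
-- from typing import List, Dict, Any
--
-- def _detect_data_domain(data_summary: Dict) -> str:
--     """Auto-detect the domain/type of data"""
--     columns_lower = [col.lower() for col in data_summary['columns']]
--
--     finance_keywords = ['budget', 'cost', 'expense', 'revenue', 'amount', 'payment', 'vendor', 'invoice']
--     hr_keywords = ['employee', 'staff', 'leave', 'performance', 'salary', 'department', 'hire', 'turnover']
--     ops_keywords = ['process', 'efficiency', 'service', 'delivery', 'issue', 'ticket', 'procurement', 'operation']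
--
--     finance_score = sum(1 for keyword in finance_keywords if any(keyword in col for col in columns_lower))
--     hr_score = sum(1 for keyword in hr_keywords if any(keyword in col for col in columns_lower))
--     ops_score = sum(1 for keyword in ops_keywords if any(keyword in col for col in columns_lower))
--
--     if finance_score >= hr_score and finance_score >= ops_score:
--         return "Finance"
--     elif hr_score >= ops_score:
--         return "HR"
--     elif ops_score > 0:
--         return "Operations"
--     else:
--         return "General Government Data"
-- ===== SOURCE B (Python) =====
-- def _detect_data_domain(data_summary):
--     """Auto-detect the domain/type of data (single pass over columns, per-domain keyword sets)"""
--     finance_keywords = ['budget', 'cost', 'expense', 'revenue', 'amount', 'payment', 'vendor', 'invoice']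
--     hr_keywords = ['employee', 'staff', 'leave', 'performance', 'salary', 'department', 'hire', 'turnover']
--     ops_keywords = ['process', 'efficiency', 'service', 'delivery', 'issue', 'ticket', 'procurement', 'operation']
--
--     fin_set, hr_set, ops_set = set(), set(), set()
--     for col in data_summary['columns']:
--         c = col.lower()
--         for kw in finance_keywords:
--             if kw in c:
--                 fin_set.add(kw)
--         for kw in hr_keywords:
--             if kw in c:
--                 hr_set.add(kw)
--         for kw in ops_keywords:
--             if kw in c:
--                 ops_set.add(kw)
--
--     finance_score, hr_score, ops_score = len(fin_set), len(hr_set), len(ops_set)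
--
--     if finance_score >= hr_score and finance_score >= ops_score:
--         return "Finance"
--     elif hr_score >= ops_score:
--         return "HR"
--     elif ops_score > 0:
--         return "Operations"
--     else:
--         return "General Government Data"
-- ===== Notes on version B (the rewrite author's own statement) =====
-- stated objective: alternative
-- what changed: Instead of three keyword-driven sums each rescanning all columns (any(...) per keyword), B makes a single pass over the columns, collecting matched keywords into three per-domain sets whose sizes become the scores; the tie-break cascade is unchanged.
import Mathlib
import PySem

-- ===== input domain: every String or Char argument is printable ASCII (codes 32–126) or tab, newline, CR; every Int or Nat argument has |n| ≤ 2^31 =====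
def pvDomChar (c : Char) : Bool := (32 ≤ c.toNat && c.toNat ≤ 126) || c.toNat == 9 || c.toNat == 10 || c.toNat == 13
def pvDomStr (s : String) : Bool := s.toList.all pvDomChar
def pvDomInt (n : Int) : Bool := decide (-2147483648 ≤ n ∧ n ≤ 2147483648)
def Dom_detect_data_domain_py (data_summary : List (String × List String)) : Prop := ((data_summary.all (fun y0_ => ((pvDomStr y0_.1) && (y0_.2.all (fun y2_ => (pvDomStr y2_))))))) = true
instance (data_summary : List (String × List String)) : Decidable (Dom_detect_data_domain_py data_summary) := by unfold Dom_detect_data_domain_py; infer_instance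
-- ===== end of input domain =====

-- B differs from A by a single pass over the columns accumulating per-domain sets of
-- matched keywords (scores = set sizes) instead of three per-keyword sums rescanning
-- all columns; equivalence of the RETURN value is proved on inputs with a 'columns' key.

def pvFinanceKeywords : List String :=
  ["budget", "cost", "expense", "revenue", "amount", "payment", "vendor", "invoice"]
def pvHrKeywords : List String :=
  ["employee", "staff", "leave", "performance", "salary", "department", "hire", "turnover"]
def pvOpsKeywords : List String :=
  ["process", "efficiency", "service", "delivery", "issue", "ticket", "procurement", "operation"]

-- ===== PORT A =====
-- literal transliteration of A: lowercase all columns, then for each keyword list sum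
-- 1 for every keyword contained in some column, then the >=/>0 cascade.
def detect_data_domain_py (data_summary : List (String × List String)) : String :=
  match data_summary.lookup "columns" with
  | none => ""   -- Python raises KeyError here; excluded by Pre_
  | some columns =>
    let columns_lower := columns.map PySem.Str.lower
    let finance_score : Int :=
      (pvFinanceKeywords.map (fun keyword =>
        if columns_lower.any (fun col => PySem.Str.isIn keyword col) then (1 : Int) else 0)).sum
    let hr_score : Int :=
      (pvHrKeywords.map (fun keyword =>
        if columns_lower.any (fun col => PySem.Str.isIn keyword col) then (1 : Int) else 0)).sum
    let ops_score : Int :=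
      (pvOpsKeywords.map (fun keyword =>
        if columns_lower.any (fun col => PySem.Str.isIn keyword col) then (1 : Int) else 0)).sum
    if finance_score ≥ hr_score ∧ finance_score ≥ ops_score then "Finance"
    else if hr_score ≥ ops_score then "HR"
    else if ops_score > 0 then "Operations"
    else "General Government Data"

-- ===== PORT B =====
-- one inner keyword loop of B: add every keyword contained in the lowercased column c
def pvAddMatches (c : String) (s : PySem.Set String) (kws : List String) : PySem.Set String :=
  kws.foldl (fun s kw => if PySem.Str.isIn kw c then PySem.Set.add s kw else s) s

def detect_data_domain_py_alt (data_summary : List (String × List String)) : String :=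
  match data_summary.lookup "columns" with
  | none => ""   -- Python raises KeyError here; excluded by Pre_
  | some columns =>
    let st := columns.foldl
      (fun (st : PySem.Set String × PySem.Set String × PySem.Set String) col =>
        let c := PySem.Str.lower col
        (pvAddMatches c st.1 pvFinanceKeywords,
         pvAddMatches c st.2.1 pvHrKeywords,
         pvAddMatches c st.2.2 pvOpsKeywords))
      (PySem.Set.empty, PySem.Set.empty, PySem.Set.empty)
    let finance_score : Int := st.1.length
    let hr_score : Int := st.2.1.length
    let ops_score : Int := st.2.2.length
    if finance_score ≥ hr_score ∧ finance_score ≥ ops_score then "Finance"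
    else if hr_score ≥ ops_score then "HR"
    else if ops_score > 0 then "Operations"
    else "General Government Data"

-- ===== PRECONDITION & SPEC =====
-- Pre_ excludes exactly the dicts without a 'columns' key, on which Python A raises KeyError.
def Pre_detect_data_domain_py (data_summary : List (String × List String)) : Prop :=
  "columns" ∈ data_summary.map Prod.fst
instance (data_summary : List (String × List String)) : Decidable (Pre_detect_data_domain_py data_summary) := by unfold Pre_detect_data_domain_py; infer_instance
def pvWitness_detect_data_domain_py : (List (String × List String)) :=
  [("columns", ["Budget_Amount", "Staff Leave"])]
def Spec_detect_data_domain_py (data_summary : List (String × List String)) (out : String) : Prop := out = detect_data_domain_py_alt data_summary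
instance (data_summary : List (String × List String)) (out : String) : Decidable (Spec_detect_data_domain_py data_summary out) := by unfold Spec_detect_data_domain_py; infer_instance

-- ===== CLAIM (what is proved, stated in full; the proofs are below) =====
def Claim_equal_detect_data_domain_py : Prop := ∀ (data_summary : List (String × List String)), Dom_detect_data_domain_py data_summary → Pre_detect_data_domain_py data_summary → Spec_detect_data_domain_py data_summary (detect_data_domain_py data_summary)

-- ===== LEMMAS AND PROOFS =====

theorem mem_pvAddMatches (c : String) (s : PySem.Set String) (kws : List String) (x : String) :
    x ∈ pvAddMatches c s kws ↔ x ∈ s ∨ (x ∈ kws ∧ PySem.Str.isIn x c = true) := by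
  induction kws generalizing s with
  | nil => simp [pvAddMatches]
  | cons k ks ih =>
    simp only [pvAddMatches, List.foldl_cons] at *
    by_cases h : PySem.Str.isIn k c = true
    · simp only [h, if_pos]
      rw [ih]
      simp only [PySem.Set.mem_add, List.mem_cons]
      constructor
      · rintro ((hs | rfl) | hk)
        · exact Or.inl hs
        · exact Or.inr ⟨Or.inl rfl, h⟩
        · exact Or.inr ⟨Or.inr hk.1, hk.2⟩
      · rintro (hs | ⟨(rfl | hk), hin⟩)
        · exact Or.inl (Or.inl hs)
        · exact Or.inl (Or.inr rfl)
        · exact Or.inr ⟨hk, hin⟩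
    · simp only [if_neg h]
      rw [ih]
      simp only [List.mem_cons]
      constructor
      · rintro (hs | hk)
        · exact Or.inl hs
        · exact Or.inr ⟨Or.inr hk.1, hk.2⟩
      · rintro (hs | ⟨(rfl | hk), hin⟩)
        · exact Or.inl hs
        · exact absurd hin h
        · exact Or.inr ⟨hk, hin⟩

theorem nodup_pvAddMatches (c : String) (s : PySem.Set String) (kws : List String)
    (h : s.Nodup) : (pvAddMatches c s kws).Nodup := by
  induction kws generalizing s with
  | nil => simpa [pvAddMatches] using h
  | cons k ks ih =>
    simp only [pvAddMatches, List.foldl_cons] at *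
    split
    · exact ih _ (PySem.Set.nodup_add s k h)
    · exact ih _ h

-- the outer fold of one component: membership
theorem mem_domainFold (kws : List String) (cols : List String) (s : PySem.Set String) (x : String) :
    x ∈ cols.foldl (fun s col => pvAddMatches (PySem.Str.lower col) s kws) s ↔
      x ∈ s ∨ (x ∈ kws ∧ ∃ col ∈ cols, PySem.Str.isIn x (PySem.Str.lower col) = true) := by
  induction cols generalizing s with
  | nil => simp
  | cons col cs ih =>
    simp only [List.foldl_cons]
    rw [ih, mem_pvAddMatches]
    simp only [List.mem_cons]
    constructor
    · rintro ((hs | ⟨hk, hin⟩) | ⟨hk, col', hc, hin⟩)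
      · exact Or.inl hs
      · exact Or.inr ⟨hk, col, Or.inl rfl, hin⟩
      · exact Or.inr ⟨hk, col', Or.inr hc, hin⟩
    · rintro (hs | ⟨hk, col', (rfl | hc), hin⟩)
      · exact Or.inl (Or.inl hs)
      · exact Or.inl (Or.inr ⟨hk, hin⟩)
      · exact Or.inr ⟨hk, col', hc, hin⟩

theorem nodup_domainFold (kws : List String) (cols : List String) (s : PySem.Set String)
    (h : s.Nodup) : (cols.foldl (fun s col => pvAddMatches (PySem.Str.lower col) s kws) s).Nodup := by
  induction cols generalizing s with
  | nil => exact h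
  | cons col cs ih => exact ih _ (nodup_pvAddMatches _ _ _ h)

-- size of the matched-keyword set = A's count of matching keywords
theorem length_domainFold (kws : List String) (cols : List String) (hk : kws.Nodup) :
    ((cols.foldl (fun s col => pvAddMatches (PySem.Str.lower col) s kws) PySem.Set.empty).length : Int) =
      (kws.countP (fun kw => cols.any (fun col => PySem.Str.isIn kw (PySem.Str.lower col)))) := by
  have hperm : (cols.foldl (fun s col => pvAddMatches (PySem.Str.lower col) s kws) PySem.Set.empty).length
      = (kws.filter (fun kw => cols.any (fun col => PySem.Str.isIn kw (PySem.Str.lower col)))).length := by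
    refine (((List.perm_ext_iff_of_nodup (nodup_domainFold kws cols _ (by simp [PySem.Set.empty]))
      (hk.filter _)).mpr ?_).length_eq)
    intro a
    rw [mem_domainFold, List.mem_filter]
    simp [PySem.Set.empty, List.any_eq_true]
  rw [hperm, List.countP_eq_length_filter]

-- the triple fold splits into three independent folds
theorem triple_fold_split (cols : List String)
    (a b c : PySem.Set String) :
    cols.foldl
      (fun (st : PySem.Set String × PySem.Set String × PySem.Set String) col =>
        let cl := PySem.Str.lower col
        (pvAddMatches cl st.1 pvFinanceKeywords,
         pvAddMatches cl st.2.1 pvHrKeywords,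
         pvAddMatches cl st.2.2 pvOpsKeywords)) (a, b, c) =
      (cols.foldl (fun s col => pvAddMatches (PySem.Str.lower col) s pvFinanceKeywords) a,
       cols.foldl (fun s col => pvAddMatches (PySem.Str.lower col) s pvHrKeywords) b,
       cols.foldl (fun s col => pvAddMatches (PySem.Str.lower col) s pvOpsKeywords) c) := by
  induction cols generalizing a b c with
  | nil => rfl
  | cons col cs ih => simp only [List.foldl_cons]; exact ih _ _ _

-- A's per-keyword score over the pre-lowered list equals the countP over raw columns
theorem scoreA_eq (kws : List String) (columns : List String) :
    ((kws.map (fun keyword =>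
        if (columns.map PySem.Str.lower).any (fun col => PySem.Str.isIn keyword col) then (1 : Int) else 0)).sum) =
      (kws.countP (fun kw => columns.any (fun col => PySem.Str.isIn kw (PySem.Str.lower col)))) := by
  rw [PySem.List.sum_map_ite_one_zero]
  congr 1
  apply List.countP_congr
  intro kw _
  simp [List.any_map, Function.comp]

-- ===== VERDICT (by name: the statement is the Claim_ definition above) =====
theorem detect_data_domain_py_spec : Claim_equal_detect_data_domain_py := by
  intro ds _ _
  unfold Spec_detect_data_domain_py detect_data_domain_py detect_data_domain_py_alt
  cases h : ds.lookup "columns" with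
  | none => rfl
  | some columns =>
    simp only
    rw [triple_fold_split]
    rw [length_domainFold pvFinanceKeywords columns (by decide),
        length_domainFold pvHrKeywords columns (by decide),
        length_domainFold pvOpsKeywords columns (by decide),
        scoreA_eq pvFinanceKeywords columns,
        scoreA_eq pvHrKeywords columns,
        scoreA_eq pvOpsKeywords columns]
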